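-- pv_equiv track=rewrite | github.com/jacques00100-cell/revenue-rescue | scripts/quick_enrich.py | get_best_email
-- ===== SOURCE A (Python) =====
-- def get_best_email(emails):
--     if not emails:
--         return ""
--     priority = ['contact@', 'info@', 'hello@', 'support@', 'admin@', 'office@', 'reception@', 'dr@']
--     for p in priority:
--         for e in emails:
--             if p in e and 'noreply' not in e:
--                 return e
--     for e in emails:
--         if 'noreply' not in e.lower():
--             return e
--     return emails[0]
-- ===== SOURCE B (Python) =====
-- def get_best_email(emails):
--     if not emails:
--         return ""
--     priority = ['contact@', 'info@', 'hello@', 'support@', 'admin@', 'office@', 'reception@', 'dr@']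
--
--     def rank(e):
--         if 'noreply' not in e:
--             for j, p in enumerate(priority):
--                 if p in e:
--                     return j
--         return 8 if 'noreply' not in e.lower() else 9
--
--     best = emails[0]
--     best_r = rank(best)
--     for e in emails[1:]:
--         v = rank(e)
--         if v < best_r:
--             best, best_r = e, v
--     return best
-- ===== Notes on version B (the rewrite author's own statement) =====
-- stated objective: alternative
-- what changed: A's prefix-major nested scan (up to 8 passes over the emails, then two fallback passes) is replaced by a single pass that assigns each email a rank 0-9 (min matching priority index if noreply-free, 8 if lower-cased noreply-free, else 9) and keeps the first email of minimal rank.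
import Mathlib
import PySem

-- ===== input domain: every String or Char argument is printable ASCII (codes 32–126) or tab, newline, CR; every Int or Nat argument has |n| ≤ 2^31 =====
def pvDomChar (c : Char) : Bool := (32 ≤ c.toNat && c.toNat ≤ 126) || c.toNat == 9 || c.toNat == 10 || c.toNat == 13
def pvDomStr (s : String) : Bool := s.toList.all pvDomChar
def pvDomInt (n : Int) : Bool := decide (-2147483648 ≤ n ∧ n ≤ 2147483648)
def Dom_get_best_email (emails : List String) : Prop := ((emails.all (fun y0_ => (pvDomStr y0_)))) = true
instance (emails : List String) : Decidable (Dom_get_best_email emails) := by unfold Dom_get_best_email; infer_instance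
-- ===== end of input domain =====

-- B replaces A's prefix-major nested scan (up to 8 passes plus two fallback passes) by a single pass
-- that keeps the first email of minimal rank; objective: alternative (same cost, different algorithm).

-- ===== PORT A =====
def pvPrio : List String :=
  ["contact@", "info@", "hello@", "support@", "admin@", "office@", "reception@", "dr@"]

-- 'for p in priority: for e in emails: if p in e and 'noreply' not in e: return e'
def pvStageOne : List String → List String → Option String
  | [], _ => none
  | p :: ps, emails =>
    match emails.find? (fun e => PySem.Str.isIn p e && !(PySem.Str.isIn "noreply" e)) with
    | some e => some e
    | none => pvStageOne ps emails

def get_best_email (emails : List String) : String :=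
  match emails with
  | [] => ""
  | e0 :: rest =>
    match pvStageOne pvPrio (e0 :: rest) with
    | some e => e
    | none =>
      match (e0 :: rest).find? (fun e => !(PySem.Str.isIn "noreply" (PySem.Str.lower e))) with
      | some e => e
      | none => e0

-- ===== PORT B =====
-- rank(e): min matching priority index if noreply-free and some prefix matches, else 8/9 by the lower() test
def pvRank (e : String) : Nat :=
  match (if !(PySem.Str.isIn "noreply" e) then pvPrio.findIdx? (fun p => PySem.Str.isIn p e) else none) with
  | some j => j
  | none => if !(PySem.Str.isIn "noreply" (PySem.Str.lower e)) then 8 else 9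

def get_best_email_alt (emails : List String) : String :=
  match emails with
  | [] => ""
  | e0 :: rest =>
    (rest.foldl (fun best e => if pvRank e < best.1 then (pvRank e, e) else best)
      (pvRank e0, e0)).2

-- ===== PRECONDITION & SPEC =====
def Spec_get_best_email (emails : List String) (out : String) : Prop := out = get_best_email_alt emails
instance (emails : List String) (out : String) : Decidable (Spec_get_best_email emails out) := by unfold Spec_get_best_email; infer_instance

-- ===== CLAIM (what is proved, stated in full; the proofs are below) =====
def Claim_equal_get_best_email : Prop := ∀ (emails : List String), Dom_get_best_email emails → Spec_get_best_email emails (get_best_email emails)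

-- ===== LEMMAS AND PROOFS =====

-- proof-only helpers: the first email of minimal rank, and the minimal rank itself
def pvPick (b : String) : List String → String
  | [] => b
  | e :: l => pvPick (if pvRank e < pvRank b then e else b) l

def pvRMin (b : String) (l : List String) : Nat :=
  l.foldl (fun m e => min m (pvRank e)) (pvRank b)

theorem pvFoldl_eq_pick (l : List String) (b : String) :
    l.foldl (fun best e => if pvRank e < best.1 then (pvRank e, e) else best) (pvRank b, b)
      = (pvRank (pvPick b l), pvPick b l) := by
  induction l generalizing b with
  | nil => rfl
  | cons e l ih =>
    simp only [List.foldl_cons, pvPick]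
    by_cases h : pvRank e < pvRank b
    · simp only [h, if_true]; exact ih e
    · simp only [h, if_false]; exact ih b

theorem pvRMin_cons (b e : String) (l : List String) :
    pvRMin b (e :: l) = pvRMin (if pvRank e < pvRank b then e else b) l := by
  simp only [pvRMin, List.foldl_cons]
  congr 1
  by_cases h : pvRank e < pvRank b <;> simp [h] <;> omega

theorem pvRMin_le (l : List String) (b : String) : pvRMin b l ≤ pvRank b := by
  induction l generalizing b with
  | nil => simp [pvRMin]
  | cons e l ih =>
    rw [pvRMin_cons]
    by_cases h : pvRank e < pvRank b
    · simp only [if_pos h]; exact le_trans (ih e) (by omega)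
    · simp only [if_neg h]; exact ih b

theorem pvRMin_lb (l : List String) (b : String) :
    ∀ x ∈ b :: l, pvRMin b l ≤ pvRank x := by
  induction l generalizing b with
  | nil => intro x hx; simp at hx; subst hx; simp [pvRMin]
  | cons e l ih =>
    intro x hx
    rw [pvRMin_cons]
    have hb1 : pvRank (if pvRank e < pvRank b then e else b) ≤ pvRank b := by
      split <;> omega
    have hb2 : pvRank (if pvRank e < pvRank b then e else b) ≤ pvRank e := by
      split <;> omega
    have hle := pvRMin_le l (if pvRank e < pvRank b then e else b)
    rcases List.mem_cons.1 hx with h0 | hx'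
    · rw [h0]; omega
    · rcases List.mem_cons.1 hx' with h0 | hx''
      · rw [h0]; omega
      · exact ih (if pvRank e < pvRank b then e else b) x
          (List.mem_cons_of_mem _ hx'')

theorem pvPick_eq_find (l : List String) (b : String) :
    (b :: l).find? (fun e => pvRank e == pvRMin b l) = some (pvPick b l) := by
  induction l generalizing b with
  | nil => simp [pvRMin, pvPick, List.find?]
  | cons e l ih =>
    rw [pvRMin_cons]
    simp only [pvPick]
    by_cases h : pvRank e < pvRank b
    · simp only [if_pos h]
      rw [← ih e]
      have hm : pvRMin e l ≤ pvRank e := pvRMin_le l e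
      have hb : (pvRank b == pvRMin e l) = false := by
        simp only [beq_eq_false_iff_ne, ne_eq]; omega
      simp only [List.find?_cons, hb]
    · simp only [if_neg h]
      have hm : pvRMin b l ≤ pvRank b := pvRMin_le l b
      by_cases hb : pvRank b = pvRMin b l
      · have : (pvRank b == pvRMin b l) = true := by simp [hb]
        rw [← ih b]
        simp only [List.find?_cons, this]
      · have hbf : (pvRank b == pvRMin b l) = false := by simp [hb]
        have hef : (pvRank e == pvRMin b l) = false := by
          simp only [beq_eq_false_iff_ne, ne_eq]; omega
        rw [← ih b]
        simp only [List.find?_cons, hbf, hef]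

theorem pvFind?_congr {p q : String → Bool} (l : List String)
    (h : ∀ e ∈ l, p e = q e) : l.find? p = l.find? q := by
  induction l with
  | nil => rfl
  | cons e l ih =>
    simp only [List.find?_cons, h e (List.mem_cons_self ..)]
    cases hq : q e
    · exact ih (fun x hx => h x (List.mem_cons_of_mem e hx))
    · rfl

theorem pvRank_fall_or_idx (e : String) :
    (pvRank e = if !(PySem.Str.isIn "noreply" (PySem.Str.lower e)) then 8 else 9)
    ∨ ∃ j < pvPrio.length, pvRank e = j := by
  rcases hb : (if !(PySem.Str.isIn "noreply" e) then pvPrio.findIdx? (fun p => PySem.Str.isIn p e) else none) with _ | j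
  · left; unfold pvRank; rw [hb]
  · right
    refine ⟨j, ?_, by unfold pvRank; rw [hb]⟩
    rcases h : PySem.Str.isIn "noreply" e
    · have h' : (!PySem.Str.isIn "noreply" e) = true := by rw [h]; rfl
      rw [h', if_pos rfl] at hb
      exact (List.findIdx?_eq_some_iff_findIdx_eq.1 hb).1
    · have h' : (!PySem.Str.isIn "noreply" e) = false := by rw [h]; rfl
      rw [h'] at hb
      simp at hb

theorem pvRank_le_nine (e : String) : pvRank e ≤ 9 := by
  rcases pvRank_fall_or_idx e with h | ⟨j, hj, h⟩
  · rw [h]; split <;> omega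
  · simp only [pvPrio, List.length_cons, List.length_nil] at hj
    omega

theorem pvRank_eq_iff (pre ps : List String) (p e : String)
    (hsplit : pre ++ p :: ps = pvPrio)
    (hge : pre.length ≤ pvRank e) :
    ((PySem.Str.isIn p e && !(PySem.Str.isIn "noreply" e)) = true ↔ pvRank e = pre.length) := by
  have hk : pre.length < pvPrio.length := by
    rw [← hsplit]; simp
  have hk7 : pre.length ≤ 7 := by
    simp only [pvPrio, List.length_cons, List.length_nil] at hk; omega
  have hpk : pvPrio[pre.length]'hk = p := by
    rw [List.getElem_of_eq hsplit.symm]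
    rw [List.getElem_append_right (le_refl pre.length)]
    simp
  constructor
  · intro hcond
    simp only [Bool.and_eq_true] at hcond
    obtain ⟨hin, hnr⟩ := hcond
    rw [Bool.not_eq_true'] at hnr
    have hex : ∃ x ∈ pvPrio, (fun p => PySem.Str.isIn p e) x = true :=
      ⟨p, by rw [← hsplit]; simp, hin⟩
    have hlt := List.findIdx_lt_length_of_exists hex
    have hfi : pvPrio.findIdx? (fun p => PySem.Str.isIn p e) = some (pvPrio.findIdx (fun p => PySem.Str.isIn p e)) :=
      List.findIdx?_eq_some_iff_findIdx_eq.2 ⟨hlt, rfl⟩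
    have hle : pvPrio.findIdx (fun p => PySem.Str.isIn p e) ≤ pre.length := by
      by_contra hgt
      rw [not_le] at hgt
      have hfalse : PySem.Str.isIn (pvPrio[pre.length]'hk) e = false :=
        List.not_of_lt_findIdx hgt
      rw [hpk] at hfalse
      rw [hfalse] at hin
      exact Bool.false_ne_true hin
    have hrank : pvRank e = pvPrio.findIdx (fun p => PySem.Str.isIn p e) := by
      unfold pvRank
      simp only [hnr, Bool.not_false, if_pos, hfi]
    omega
  · intro hr
    unfold pvRank at hr
    rcases hb : (if !(PySem.Str.isIn "noreply" e) then pvPrio.findIdx? (fun p => PySem.Str.isIn p e) else none) with _ | j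
    · rw [hb] at hr
      have hr' : (if !(PySem.Str.isIn "noreply" (PySem.Str.lower e)) then 8 else 9) = pre.length := hr
      exfalso
      split at hr' <;> omega
    · rw [hb] at hr
      have hr' : j = pre.length := hr
      have hnr' : PySem.Str.isIn "noreply" e = false := by
        cases h : PySem.Str.isIn "noreply" e
        · rfl
        · exfalso
          have h2 : (!PySem.Str.isIn "noreply" e) = false := by rw [h]; rfl
          rw [h2] at hb
          simp at hb
      have h2 : (!PySem.Str.isIn "noreply" e) = true := by rw [hnr']; rfl
      rw [h2, if_pos rfl] at hb
      obtain ⟨hlt, hfe⟩ := List.findIdx?_eq_some_iff_findIdx_eq.1 hb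
      have hpred : PySem.Str.isIn (pvPrio[pvPrio.findIdx (fun p => PySem.Str.isIn p e)]'(by rw [hfe]; exact hlt)) e = true :=
        @List.findIdx_getElem _ (fun q => PySem.Str.isIn q e) pvPrio (by rw [hfe]; exact hlt)
      have hidx : pvPrio.findIdx (fun p => PySem.Str.isIn p e) = pre.length := by
        rw [hfe]; exact hr'
      have hgc : (pvPrio[pvPrio.findIdx (fun p => PySem.Str.isIn p e)]'(by rw [hfe]; exact hlt)) = p := by
        rw [getElem_congr_idx hidx]; exact hpk
      rw [hgc] at hpred
      simp only [Bool.and_eq_true, Bool.not_eq_true']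
      exact ⟨hpred, hnr'⟩

theorem pvRank_ge8_iff (e : String) (hge : 8 ≤ pvRank e) :
    ((!(PySem.Str.isIn "noreply" (PySem.Str.lower e))) = true ↔ pvRank e = 8) := by
  have hfall : pvRank e = if !(PySem.Str.isIn "noreply" (PySem.Str.lower e)) then 8 else 9 := by
    rcases pvRank_fall_or_idx e with h | ⟨j, hj, h⟩
    · exact h
    · simp only [pvPrio, List.length_cons, List.length_nil] at hj
      omega
  rcases h : (!(PySem.Str.isIn "noreply" (PySem.Str.lower e))) with _ | _ <;>
    rw [h] at hfall <;> simp [hfall]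

theorem pvStageOne_spec (emails : List String) (M : Nat)
    (hlb : ∀ e ∈ emails, M ≤ pvRank e)
    (hach : ∃ x ∈ emails, pvRank x = M) :
    ∀ (ps pre : List String), pre ++ ps = pvPrio →
    (∀ e ∈ emails, pre.length ≤ pvRank e) →
    pvStageOne ps emails = if M ≤ 7 then emails.find? (fun e => pvRank e == M) else none := by
  intro ps
  induction ps with
  | nil =>
    intro pre hsplit hge
    have hlen : pre.length = 8 := by
      have := congrArg List.length hsplit
      simpa [pvPrio] using this
    obtain ⟨x, hx, hrx⟩ := hach
    have := hge x hx
    rw [hlen, hrx] at this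
    rw [if_neg (by omega)]
    rfl
  | cons p ps ih =>
    intro pre hsplit hge
    have hcongr : emails.find? (fun e => PySem.Str.isIn p e && !(PySem.Str.isIn "noreply" e))
        = emails.find? (fun e => pvRank e == pre.length) := by
      apply pvFind?_congr
      intro e he
      have hiff := pvRank_eq_iff pre ps p e hsplit (hge e he)
      cases h1 : (PySem.Str.isIn p e && !(PySem.Str.isIn "noreply" e)) with
      | false =>
        have hne : pvRank e ≠ pre.length := fun hc => by
          have h2 := hiff.2 hc
          rw [h1] at h2
          exact Bool.false_ne_true h2
        have h3 : (pvRank e == pre.length) = false := by simp [hne]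
        rw [h3]
      | true =>
        have h2 := hiff.1 h1
        have h3 : (pvRank e == pre.length) = true := by simp [h2]
        rw [h3]
    simp only [pvStageOne, hcongr]
    rcases hfind : emails.find? (fun e => pvRank e == pre.length) with _ | x
    · have hnone : ∀ e ∈ emails, pvRank e ≠ pre.length := by
        intro e he hc
        have := List.find?_eq_none.1 hfind e he
        simp [hc] at this
      have hge' : ∀ e ∈ emails, (pre ++ [p]).length ≤ pvRank e := by
        intro e he
        have h1 := hge e he
        have h2 := hnone e he
        simp only [List.length_append, List.length_cons, List.length_nil]
        omega
      have := ih (pre ++ [p]) (by rw [← hsplit]; simp) hge'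
      simpa using this
    · have hx : x ∈ emails := List.mem_of_find?_eq_some hfind
      have hrx : pvRank x = pre.length := by
        have := List.find?_some hfind
        simpa using this
      have hMk : M = pre.length := by
        have h1 := hlb x hx
        obtain ⟨y, hy, hry⟩ := hach
        have h2 := hge y hy
        omega
      have hM7 : M ≤ 7 := by
        have hklt : pre.length < pvPrio.length := by rw [← hsplit]; simp
        simp only [pvPrio, List.length_cons, List.length_nil] at hklt
        omega
      rw [if_pos hM7, hMk, hfind]

-- ===== VERDICT (by name: the statement is the Claim_ definition above) =====
theorem get_best_email_spec : Claim_equal_get_best_email := by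
  intro emails _
  unfold Spec_get_best_email
  match emails with
  | [] => rfl
  | e0 :: rest =>
    have hb : get_best_email_alt (e0 :: rest) = pvPick e0 rest := by
      simp only [get_best_email_alt, pvFoldl_eq_pick]
    set M := pvRMin e0 rest with hM
    have hlb : ∀ e ∈ e0 :: rest, M ≤ pvRank e := pvRMin_lb rest e0
    have hfindM : (e0 :: rest).find? (fun e => pvRank e == M) = some (pvPick e0 rest) :=
      pvPick_eq_find rest e0
    have hach : ∃ x ∈ e0 :: rest, pvRank x = M :=
      ⟨pvPick e0 rest, List.mem_of_find?_eq_some hfindM, by simpa using List.find?_some hfindM⟩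
    have hs1 := pvStageOne_spec (e0 :: rest) M hlb hach pvPrio [] rfl (by intro e _; simp)
    rw [hb]
    by_cases h7 : M ≤ 7
    · rw [if_pos h7, hfindM] at hs1
      simp only [get_best_email, hs1]
    · rw [if_neg h7] at hs1
      obtain ⟨x, hx, hrx⟩ := hach
      have h9 : M ≤ 9 := by have := pvRank_le_nine x; omega
      have hge8 : ∀ e ∈ e0 :: rest, 8 ≤ pvRank e := fun e he => by
        have := hlb e he; omega
      have hcongr2 : (e0 :: rest).find? (fun e => !(PySem.Str.isIn "noreply" (PySem.Str.lower e)))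
          = (e0 :: rest).find? (fun e => pvRank e == 8) := by
        apply pvFind?_congr
        intro e he
        have hiff := pvRank_ge8_iff e (hge8 e he)
        cases h1 : (!(PySem.Str.isIn "noreply" (PySem.Str.lower e))) with
        | false =>
          have hne : pvRank e ≠ 8 := fun hc => by
            have h2 := hiff.2 hc
            rw [h1] at h2
            exact Bool.false_ne_true h2
          have h3 : (pvRank e == 8) = false := by simp [hne]
          rw [h3]
        | true =>
          have h2 := hiff.1 h1
          have h3 : (pvRank e == 8) = true := by simp [h2]
          rw [h3]
      rcases (by omega : M = 8 ∨ M = 9) with h8 | h9'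
      · rw [h8] at hfindM
        simp only [get_best_email, hs1, hcongr2, hfindM]
      · -- all ranks are 9: stage 2 finds nothing, A returns e0; B's pick is e0
        have hall9 : ∀ e ∈ e0 :: rest, pvRank e = 9 := fun e he => by
          have h1 := hlb e he
          have h2 := pvRank_le_nine e
          omega
        have hfind2 : (e0 :: rest).find? (fun e => pvRank e == 8) = none := by
          rw [List.find?_eq_none]
          intro e he
          have := hall9 e he
          simp [this]
        have hpick : pvPick e0 rest = e0 := by
          have h0 : pvRank e0 = 9 := hall9 e0 (List.mem_cons_self ..)
          have : (e0 :: rest).find? (fun e => pvRank e == M) = some e0 := by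
            simp [h0, h9']
          rw [hfindM] at this
          exact Option.some_inj.1 this
        simp only [get_best_email, hs1, hcongr2, hfind2, hpick]
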